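-- pv_equiv track=rewrite | github.com/Lucenix/LA2 | treino4/superstring.py | extensions
-- ===== SOURCE A (Python) =====
-- def extensions(p,c,k,ind):
--     if not ind:
--         return [(palavra, len(palavra)) for palavra in p]
--     l = list()
--     last = ind[-1]
--     for palavra in p:
--         if palavra not in c:
--             for j in range(len(palavra)-1, -1, -1):
--                 if last.endswith(palavra[:j]) and sum(c.values())+len(palavra)-j<=k:
--                     l.append((palavra, len(palavra)-j))
--     return l
-- ===== SOURCE B (Python) =====
-- def extensions(p, c, k, ind):
--     # One left-to-right pass over `last` maintaining the set of ALL current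
--     # suffix-prefix match lengths (an NFA of the naive j-scan), instead of
--     # re-slicing and re-summing for every j.
--     if not ind:
--         return [(w, len(w)) for w in p]
--     last = ind[-1]
--     total = sum(c.values())
--     out = []
--     for w in p:
--         if w in c:
--             continue
--         n = len(w)
--         # active = descending list of all j with w[:j] a suffix of the scanned prefix of last
--         active = [0]
--         for ch in last:
--             active = [j + 1 for j in active if j < n and w[j] == ch] + [0]
--         for j in active:
--             if j <= n - 1 and total + n - j <= k:
--                 out.append((w, n - j))
--     return out
-- ===== Notes on version B (the rewrite author's own statement) =====
-- stated objective: alternative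
-- what changed: Instead of testing every prefix length j by slicing w[:j], calling endswith and re-summing c.values() inside the inner loop, B sums c.values() once and makes a single left-to-right pass over `last` per word, maintaining the set of all current suffix-prefix match lengths (an NFA-style active-length set), then filters that set by the length budget.
import Mathlib
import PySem

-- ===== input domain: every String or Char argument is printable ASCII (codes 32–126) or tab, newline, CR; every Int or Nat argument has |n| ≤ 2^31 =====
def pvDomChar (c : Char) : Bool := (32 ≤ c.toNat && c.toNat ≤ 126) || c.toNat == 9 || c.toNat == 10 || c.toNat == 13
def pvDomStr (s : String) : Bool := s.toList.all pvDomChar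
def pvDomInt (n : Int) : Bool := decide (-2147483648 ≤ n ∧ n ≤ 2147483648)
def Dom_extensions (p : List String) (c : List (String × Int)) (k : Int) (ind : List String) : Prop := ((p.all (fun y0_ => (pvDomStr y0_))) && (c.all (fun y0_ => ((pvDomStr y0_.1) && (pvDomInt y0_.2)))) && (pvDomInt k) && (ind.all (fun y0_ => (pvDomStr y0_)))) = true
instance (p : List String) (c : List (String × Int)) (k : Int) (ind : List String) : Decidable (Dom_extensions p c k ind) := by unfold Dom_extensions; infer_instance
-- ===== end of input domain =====

-- B replaces A's inner scan over all prefix lengths j (slicing w[:j], endswith, and re-summing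
-- c.values() for each j) by one left-to-right pass over `last` that maintains the set of all
-- current suffix-prefix match lengths, with the budget sum computed once (objective: alternative).

-- ===== PORT A =====
-- literal transliteration of A; the Python dict c is modelled through PySem.Dict.
def extensions (p : List String) (c : List (String × Int)) (k : Int) (ind : List String) : List (String × Int) :=
  if ind.isEmpty then
    p.map (fun palavra => (palavra, PySem.Str.len palavra))
  else
    -- ind[-1]; this branch has ind ≠ [], so the default "" is never used
    let last := (PySem.List.pyGet? ind (-1)).getD ""
    p.foldl (fun l palavra =>
      if (PySem.Dict.mk c).contains palavra = true then l
      else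
        (PySem.List.pyRange (PySem.Str.len palavra - 1) (-1) (-1)).foldl (fun l j =>
          if PySem.Str.endswith last (PySem.Str.slice palavra none (some j)) = true ∧
             (PySem.Dict.values (PySem.Dict.mk c)).sum + PySem.Str.len palavra - j ≤ k then
            l ++ [(palavra, PySem.Str.len palavra - j)]
          else l) l) []

-- ===== PORT B =====
-- one step of B's scan over `last`: advance every active match length that continues with ch, restart at 0
def altStep (wc : List Char) (active : List Nat) (ch : Char) : List Nat :=
  (active.filterMap (fun j => if h : j < wc.length then (if wc[j] = ch then some (j + 1) else none) else none)) ++ [0]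

def extensions_alt (p : List String) (c : List (String × Int)) (k : Int) (ind : List String) : List (String × Int) :=
  if ind.isEmpty then
    p.map (fun w => (w, PySem.Str.len w))
  else
    let last := (PySem.List.pyGet? ind (-1)).getD ""
    let total := (PySem.Dict.values (PySem.Dict.mk c)).sum
    p.foldl (fun out w =>
      if (PySem.Dict.mk c).contains w = true then out
      else
        let wc := w.toList
        let active := last.toList.foldl (altStep wc) [0]
        active.foldl (fun out (j : Nat) =>
          if (j : Int) ≤ (wc.length : Int) - 1 ∧ total + (wc.length : Int) - (j : Int) ≤ k then
            out ++ [(w, (wc.length : Int) - (j : Int))]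
          else out) out) []

-- ===== PRECONDITION & SPEC =====
def Spec_extensions (p : List String) (c : List (String × Int)) (k : Int) (ind : List String) (out : List (String × Int)) : Prop := out = extensions_alt p c k ind
instance (p : List String) (c : List (String × Int)) (k : Int) (ind : List String) (out : List (String × Int)) : Decidable (Spec_extensions p c k ind out) := by unfold Spec_extensions; infer_instance

-- ===== CLAIM (what is proved, stated in full; the proofs are below) =====
def Claim_equal_extensions : Prop := ∀ (p : List String) (c : List (String × Int)) (k : Int) (ind : List String), Dom_extensions p c k ind → Spec_extensions p c k ind (extensions p c k ind)

-- ===== LEMMAS AND PROOFS =====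

-- canonical description of B's active set: all j ≤ |wc| with wc.take j a suffix of sc, descending
def ovl (wc sc : List Char) : List Nat :=
  ((List.range (wc.length + 1)).reverse).filter (fun j => decide (wc.take j <:+ sc))

theorem mem_altStep (wc : List Char) (A : List Nat) (ch : Char) (j : Nat) :
    j ∈ altStep wc A ch ↔ j = 0 ∨ ∃ i, i ∈ A ∧ ∃ h : i < wc.length, wc[i] = ch ∧ j = i + 1 := by
  simp only [altStep, List.mem_append, List.mem_filterMap, List.mem_singleton]
  constructor
  · rintro (⟨i, hi, hf⟩ | h)
    · right
      split at hf
      · split at hf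
        · exact ⟨i, hi, ‹_›, ‹_›, (Option.some_inj.mp hf).symm⟩
        · exact absurd hf (by simp)
      · exact absurd hf (by simp)
    · exact Or.inl h
  · rintro (h | ⟨i, hi, h, hc, rfl⟩)
    · exact Or.inr h
    · exact Or.inl ⟨i, hi, by simp [h, hc]⟩

theorem snoc_suffix_snoc (l s : List Char) (a b : Char) :
    (l ++ [a] <:+ s ++ [b]) ↔ a = b ∧ l <:+ s := by
  rw [← List.reverse_prefix, ← List.reverse_prefix (l₁ := l)]
  simp [List.cons_prefix_cons]

theorem take_suffix_snoc (wc sc : List Char) (ch : Char) (j : Nat) (hj : j ≤ wc.length) :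
    (wc.take j <:+ sc ++ [ch]) ↔ (j = 0 ∨ ∃ i, (∃ h : i < wc.length, wc[i] = ch) ∧ j = i + 1 ∧ wc.take i <:+ sc) := by
  cases j with
  | zero => simp
  | succ i =>
    have hi : i < wc.length := by omega
    have ht : wc.take (i+1) = wc.take i ++ [wc[i]] := by
      rw [List.take_add_one]; simp [List.getElem?_eq_getElem hi]
    rw [ht, snoc_suffix_snoc]
    constructor
    · rintro ⟨heq, hsuf⟩
      exact Or.inr ⟨i, ⟨hi, heq⟩, rfl, hsuf⟩
    · rintro (h | ⟨i', ⟨h', hc⟩, heq, hsuf⟩)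
      · omega
      · obtain rfl : i' = i := by omega
        exact ⟨hc, hsuf⟩

theorem active_mem (wc sc : List Char) (j : Nat) :
    j ∈ sc.foldl (altStep wc) [0] ↔ j ≤ wc.length ∧ wc.take j <:+ sc := by
  induction sc using List.reverseRecOn generalizing j with
  | nil =>
    simp only [List.foldl_nil, List.mem_singleton, List.suffix_nil, List.take_eq_nil_iff]
    constructor
    · rintro rfl; exact ⟨Nat.zero_le _, by simp⟩
    · rintro ⟨hj, h | h⟩ <;> simp_all
  | append_singleton sc ch ih =>
    rw [List.foldl_append, List.foldl_cons, List.foldl_nil, mem_altStep]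
    constructor
    · rintro (rfl | ⟨i, hiA, h, hc, rfl⟩)
      · exact ⟨Nat.zero_le _, by simp⟩
      · have h2 := (ih i).mp hiA
        exact ⟨by omega, (take_suffix_snoc wc sc ch (i+1) (by omega)).mpr (Or.inr ⟨i, ⟨h, hc⟩, rfl, h2.2⟩)⟩
    · rintro ⟨hj, hs⟩
      rcases (take_suffix_snoc wc sc ch j hj).mp hs with rfl | ⟨i, ⟨h, hc⟩, rfl, hsuf⟩
      · exact Or.inl rfl
      · exact Or.inr ⟨i, (ih i).mpr ⟨by omega, hsuf⟩, h, hc, rfl⟩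

theorem altStep_val (wc : List Char) (ch : Char) (i x : Nat)
    (h : (if h : i < wc.length then (if wc[i] = ch then some (i + 1) else none) else none) = some x) :
    x = i + 1 := by
  split at h
  · split at h
    · exact (Option.some_inj.mp h).symm
    · exact absurd h (by simp)
  · exact absurd h (by simp)

theorem active_pairwise (wc sc : List Char) :
    (sc.foldl (altStep wc) [0]).Pairwise (· > ·) := by
  induction sc using List.reverseRecOn with
  | nil => simp
  | append_singleton sc ch ih =>
    rw [List.foldl_append, List.foldl_cons, List.foldl_nil]
    unfold altStep
    rw [List.pairwise_append]
    refine ⟨?_, by simp, ?_⟩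
    · rw [List.pairwise_filterMap]
      refine ih.imp ?_
      intro a b hab x hx y hy
      have := altStep_val wc ch a x hx
      have := altStep_val wc ch b y hy
      omega
    · intro x hx y hy
      obtain ⟨i, _, hf⟩ := List.mem_filterMap.mp hx
      have := altStep_val wc ch i x hf
      simp at hy
      omega

theorem ovl_mem (wc sc : List Char) (j : Nat) :
    j ∈ ovl wc sc ↔ j ≤ wc.length ∧ wc.take j <:+ sc := by
  simp [ovl]

theorem ovl_pairwise (wc sc : List Char) : (ovl wc sc).Pairwise (· > ·) := by
  refine List.Pairwise.filter _ ?_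
  rw [List.pairwise_reverse]
  exact List.pairwise_lt_range

theorem active_eq_ovl (wc sc : List Char) : sc.foldl (altStep wc) [0] = ovl wc sc := by
  have h1 := active_pairwise wc sc
  have h2 := ovl_pairwise wc sc
  have nd1 : (sc.foldl (altStep wc) [0]).Nodup := h1.imp (fun h => by omega)
  have nd2 : (ovl wc sc).Nodup := h2.imp (fun h => by omega)
  exact ((List.perm_ext_iff_of_nodup nd1 nd2).mpr
    (fun x => (active_mem wc sc x).trans (ovl_mem wc sc x).symm)).eq_of_pairwise
    (by intro a b _ _ hab hba; omega) h1 h2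

theorem pyRange_desc (n : Nat) :
    PySem.List.pyRange ((n : Int) - 1) (-1) (-1) = ((List.range n).reverse).map (fun (j : Nat) => (j : Int)) := by
  induction n with
  | zero => rw [PySem.List.pyRange_neg_one_eq_nil (by omega)]; simp
  | succ n ih =>
    rw [show ((n + 1 : Nat) : Int) - 1 = (n : Int) by push_cast; ring] at *
    rw [PySem.List.pyRange_neg_one_cons (by omega)]
    rw [show (n : Int) - 1 = ((n : Nat) : Int) - 1 by norm_num] at *
    rw [ih, List.range_succ]
    simp

-- A's inner j-loop result equals B's filtered active set, per word
theorem inner_eq (w last : String) (S k : Int) :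
    ((PySem.List.pyRange (PySem.Str.len w - 1) (-1) (-1)).filter
        (fun j => decide (PySem.Str.endswith last (PySem.Str.slice w none (some j)) = true ∧
                          S + PySem.Str.len w - j ≤ k))).map
      (fun j => (w, PySem.Str.len w - j))
    =
    ((last.toList.foldl (altStep w.toList) [0]).filter
        (fun (j : Nat) => decide ((j : Int) ≤ (w.toList.length : Int) - 1 ∧
                          S + (w.toList.length : Int) - (j : Int) ≤ k))).map
      (fun (j : Nat) => (w, ((w.toList.length : Int) - (j : Int)))) := by
  rw [active_eq_ovl]
  have hlen : PySem.Str.len w = ((w.toList.length : Nat) : Int) := by simp [pysem]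
  rw [hlen, pyRange_desc, List.filter_map, List.map_map]
  simp only [Function.comp_def]
  unfold ovl
  rw [List.filter_filter, List.range_succ, List.reverse_append, List.reverse_singleton,
      List.singleton_append]
  rw [List.filter_cons_of_neg (by simp)]
  congr 1
  apply List.filter_congr
  intro j hj
  rw [List.mem_reverse, List.mem_range] at hj
  by_cases ht : w.toList.take j <:+ last.toList <;>
    simp [PySem.Chars.endswith_iff, ht, show j < w.length by simpa using hj]

-- ===== VERDICT (by name: the statement is the Claim_ definition above) =====
theorem extensions_spec : Claim_equal_extensions := by
  intro p c k ind _
  unfold Spec_extensions extensions extensions_alt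
  by_cases h : ind.isEmpty
  · simp only [h, if_true]
  · simp only [h]
    apply PySem.List.foldl_congr_mem
    intro acc w _
    by_cases hc : (PySem.Dict.mk c).contains w = true
    · simp only [hc, if_true]
    · simp only [hc]
      rw [PySem.List.foldl_append_ite
            (p := fun j => PySem.Str.endswith ((PySem.List.pyGet? ind (-1)).getD "")
                    (PySem.Str.slice w none (some j)) = true ∧
                  (PySem.Dict.values (PySem.Dict.mk c)).sum + PySem.Str.len w - j ≤ k)
            (f := fun j => (w, PySem.Str.len w - j)),
          PySem.List.foldl_append_ite
            (p := fun (j : Nat) => (j : Int) ≤ (w.toList.length : Int) - 1 ∧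
                  (PySem.Dict.values (PySem.Dict.mk c)).sum + (w.toList.length : Int) - (j : Int) ≤ k)
            (f := fun (j : Nat) => (w, ((w.toList.length : Int) - (j : Int)))),
          inner_eq]
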